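-- pv_equiv track=rewrite | github.com/Hansimov/bili-search | llms/planning/mixin.py | _extract_user_filters_from_query
-- ===== SOURCE A (Python) =====
-- def _extract_user_filters_from_query(query: str) -> list[str]:
--     text = str(query or "")
--     if ":uid=" in text:
--         return []
--     names: list[str] = []
--     for token in text.split():
--         if not token.startswith(":user="):
--             continue
--         name = token.split("=", 1)[1].strip()
--         if name and name not in names:
--             names.append(name)
--     return names
-- ===== SOURCE B (Python) =====
-- def _extract_user_filters_from_query(query: str) -> list[str]:
--     text = str(query or "")
--     if ":uid=" in text:
--         return []
--     names: list[str] = []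
--     i = 0
--     n = len(text)
--     boundary = True
--     while i < n:
--         c = text[i]
--         if c.isspace():
--             boundary = True
--             i += 1
--             continue
--         if boundary and text.startswith(":user=", i):
--             j = i + 6
--             while j < n and not text[j].isspace():
--                 j += 1
--             name = text[i + 6:j]
--             if name and name not in names:
--                 names.append(name)
--             i = j
--         else:
--             while i < n and not text[i].isspace():
--                 i += 1
--         boundary = False
--     return names
-- ===== Notes on version B (the rewrite author's own statement) =====
-- stated objective: alternative
-- what changed: Replaces the split()-into-a-token-list-then-filter pass with a single in-place character scan that recognises token boundaries itself and slices each :user= value directly out of the text, deduplicating as it goes.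
import Mathlib
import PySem

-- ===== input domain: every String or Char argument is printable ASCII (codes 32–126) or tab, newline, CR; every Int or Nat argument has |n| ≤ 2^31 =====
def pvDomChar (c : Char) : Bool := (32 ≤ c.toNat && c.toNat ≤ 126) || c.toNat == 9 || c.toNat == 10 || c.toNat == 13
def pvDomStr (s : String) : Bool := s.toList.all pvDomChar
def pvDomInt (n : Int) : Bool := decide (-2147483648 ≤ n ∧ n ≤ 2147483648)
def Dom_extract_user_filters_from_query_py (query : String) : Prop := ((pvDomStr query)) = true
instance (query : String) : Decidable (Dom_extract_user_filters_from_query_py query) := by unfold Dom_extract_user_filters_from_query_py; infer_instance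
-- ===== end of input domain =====

-- B replaces A's split()-into-tokens pass by a single character scan that finds token
-- boundaries itself and slices the :user= values straight out of the text (objective: alternative).

-- ===== PORT A =====
-- loop body of A's `for token in text.split()`
def pvAStep (names : List String) (token : String) : List String :=
  if !(PySem.Str.startswith token ":user=") then names
  else
    -- token.split("=", 1)[1].strip(): the startswith guard guarantees a "=", so the
    -- index [1] always exists and the .getD defaults are never reached
    let name := PySem.Str.strip
      ((PySem.List.pyGet? ((PySem.Str.splitMax? token "=" 1).getD []) 1).getD "")
    if name ≠ "" ∧ name ∉ names then names ++ [name] else names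

def extract_user_filters_from_query_py (query : String) : List String :=
  -- text = str(query or "") is the string query itself
  if PySem.Str.isIn ":uid=" query then []
  else (PySem.Str.split₀ query).foldl pvAStep []

-- ===== PORT B =====
def pvUserKey : List Char := [':', 'u', 's', 'e', 'r', '=']

def pvNotSpace : Char → Bool := fun ch => !PySem.Chars.isspace ch

-- B's while loop: one pass over the characters with a token-boundary flag
def pvScan : List Char → Bool → List String → List String
  | [], _, names => names
  | c :: rest, boundary, names =>
    if PySem.Chars.isspace c then pvScan rest true names
    else if boundary && PySem.Chars.startswith (c :: rest) pvUserKey then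
      let nameChars := ((c :: rest).drop 6).takeWhile pvNotSpace
      pvScan (((c :: rest).drop 6).dropWhile pvNotSpace) false
        (if nameChars ≠ [] ∧ String.ofList nameChars ∉ names
         then names ++ [String.ofList nameChars] else names)
    else pvScan ((c :: rest).dropWhile pvNotSpace) false names
  termination_by s _ _ => s.length
  decreasing_by
  · simp
  · have h := List.length_dropWhile_le pvNotSpace ((c :: rest).drop 6)
    simp at h ⊢
    omega
  · have hc : pvNotSpace c = true := by simp [pvNotSpace, *]
    rw [List.dropWhile_cons, if_pos hc]
    have h := List.length_dropWhile_le pvNotSpace rest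
    simp
    omega

def extract_user_filters_from_query_py_alt (query : String) : List String :=
  -- text = str(query or "") is the string query itself
  if PySem.Str.isIn ":uid=" query then []
  else pvScan query.toList true []

-- ===== PRECONDITION & SPEC =====
def Spec_extract_user_filters_from_query_py (query : String) (out : List String) : Prop := out = extract_user_filters_from_query_py_alt query
instance (query : String) (out : List String) : Decidable (Spec_extract_user_filters_from_query_py query out) := by unfold Spec_extract_user_filters_from_query_py; infer_instance

-- ===== CLAIM (what is proved, stated in full; the proofs are below) =====
def Claim_equal_extract_user_filters_from_query_py : Prop := ∀ (query : String), Dom_extract_user_filters_from_query_py query → Spec_extract_user_filters_from_query_py query (extract_user_filters_from_query_py query)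

-- ===== LEMMAS AND PROOFS =====

-- the word list text.split() produces, in takeWhile/dropWhile form
def pvWsplit : List Char → List (List Char)
  | [] => []
  | c :: s =>
    if PySem.Chars.isspace c then pvWsplit s
    else (c :: s.takeWhile pvNotSpace) :: pvWsplit (s.dropWhile pvNotSpace)
  termination_by s => s.length
  decreasing_by
  · simp
  · have h := List.length_dropWhile_le pvNotSpace s
    simp
    omega

-- A's loop body on a char-list token
def pvAStepC (names : List String) (tok : List Char) : List String :=
  pvAStep names (String.ofList tok)

theorem pvKey_notspace : ∀ c ∈ pvUserKey, pvNotSpace c = true := by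
  intro c hc; fin_cases hc <;> rfl

theorem pvGo_spec (s : List Char) : ∀ cur acc, PySem.Chars.split₀.go s cur acc =
    acc.reverse ++ (if cur.isEmpty then pvWsplit s
                    else (cur.reverse ++ s.takeWhile pvNotSpace) ::
                          pvWsplit (s.dropWhile pvNotSpace)) := by
  induction s with
  | nil =>
    intro cur acc
    cases cur <;> simp [PySem.Chars.split₀.go, pvWsplit]
  | cons c s ih =>
    intro cur acc
    by_cases hsp : PySem.Chars.isspace c = true
    · have hns : pvNotSpace c = false := by simp [pvNotSpace, hsp]
      cases cur with
      | nil =>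
        simp only [PySem.Chars.split₀.go, hsp, if_true, List.isEmpty_nil, ih]
        simp [pvWsplit, hsp]
      | cons d cur' =>
        simp only [PySem.Chars.split₀.go, hsp, if_true, List.isEmpty_cons, ih]
        simp [pvWsplit, hsp, hns]
    · have hns : pvNotSpace c = true := by simp [pvNotSpace, hsp]
      have hgo : PySem.Chars.split₀.go (c :: s) cur acc =
          PySem.Chars.split₀.go s (c :: cur) acc := by
        simp [PySem.Chars.split₀.go, hsp]
      rw [hgo, ih]
      cases cur with
      | nil => simp [pvWsplit, hsp]
      | cons d cur' => simp [hns]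

theorem pvSplit₀_eq (s : List Char) : PySem.Chars.split₀ s = pvWsplit s := by
  simpa using pvGo_spec s [] []

theorem pvStrip_id {l : List Char} (h : ∀ c ∈ l, PySem.Chars.isspace c = false) :
    PySem.Chars.strip l = l := by
  have h1 : List.dropWhile PySem.Chars.isspace l = l := by
    rw [List.dropWhile_eq_self_iff]
    intro hl
    exact (by simp [h _ (List.getElem_mem hl)])
  have h2 : List.dropWhile PySem.Chars.isspace l.reverse = l.reverse := by
    rw [List.dropWhile_eq_self_iff]
    intro hl
    have hl' : 0 < l.length := by simpa using hl
    have hm : l[l.length - 1]'(by omega) ∈ l := List.getElem_mem _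
    simp [h _ hm]
  simp [PySem.Chars.strip, PySem.Chars.lstrip, PySem.Chars.rstrip, h1, h2]

theorem pvSplitTok (t : List Char) :
    PySem.Chars.splitMax? (pvUserKey ++ t) ['='] 1 = some [[':', 'u', 's', 'e', 'r'], t] := by
  cases t <;>
    simp [pvUserKey, PySem.Chars.splitMax?, PySem.Chars.splitOnMax, PySem.Chars.splitOnMax.go]

theorem pvPrefix_takeWhile (l : List Char) :
    pvUserKey.isPrefixOf (l.takeWhile pvNotSpace) = pvUserKey.isPrefixOf l := by
  by_cases h : pvUserKey <+: l
  · obtain ⟨r, hr⟩ := h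
    subst hr
    rw [List.takeWhile_append_of_pos pvKey_notspace]
    have h1 : pvUserKey.isPrefixOf (pvUserKey ++ List.takeWhile pvNotSpace r) = true :=
      List.isPrefixOf_iff_prefix.mpr (List.prefix_append _ _)
    have h2 : pvUserKey.isPrefixOf (pvUserKey ++ r) = true :=
      List.isPrefixOf_iff_prefix.mpr (List.prefix_append _ _)
    rw [h1, h2]
  · have h2 : ¬ pvUserKey <+: l.takeWhile pvNotSpace := fun hp =>
      h (hp.trans (List.takeWhile_prefix _))
    have e1 : pvUserKey.isPrefixOf (l.takeWhile pvNotSpace) = false := by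
      rw [Bool.eq_false_iff]; exact fun hp => h2 (List.isPrefixOf_iff_prefix.mp hp)
    have e2 : pvUserKey.isPrefixOf l = false := by
      rw [Bool.eq_false_iff]; exact fun hp => h (List.isPrefixOf_iff_prefix.mp hp)
    rw [e1, e2]

theorem pvAStepC_skip (names : List String) (tok : List Char)
    (h : PySem.Chars.startswith tok pvUserKey = false) : pvAStepC names tok = names := by
  simp only [pvUserKey] at h
  simp [pvAStepC, pvAStep, h]

theorem pvTakeWhile_no_space (r : List Char) :
    ∀ c ∈ r.takeWhile pvNotSpace, PySem.Chars.isspace c = false := by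
  intro c hc
  have := List.mem_takeWhile_imp hc
  simpa [pvNotSpace] using this

theorem pvAStepC_match (names : List String) (r : List Char) :
    pvAStepC names (pvUserKey ++ r.takeWhile pvNotSpace) =
      (if r.takeWhile pvNotSpace ≠ [] ∧ String.ofList (r.takeWhile pvNotSpace) ∉ names
       then names ++ [String.ofList (r.takeWhile pvNotSpace)] else names) := by
  set t := r.takeWhile pvNotSpace with ht
  have hstart : PySem.Str.startswith (String.ofList (pvUserKey ++ t)) ":user=" = true := by
    rw [PySem.Str.startswith_eq]
    simp [show ":user=".toList = pvUserKey from rfl, PySem.Chars.startswith,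
      List.isPrefixOf_iff_prefix]
  have hsplit : PySem.Str.splitMax? (String.ofList (pvUserKey ++ t)) "=" 1 =
      some [String.ofList [':', 'u', 's', 'e', 'r'], String.ofList t] := by
    simp [PySem.Str.splitMax?, show "=".toList = ['='] from rfl, pvSplitTok t]
  have hstripc : PySem.Chars.strip t = t :=
    pvStrip_id (fun c hc => pvTakeWhile_no_space r c (ht ▸ hc))
  have hstrip : PySem.Str.strip (String.ofList t) = String.ofList t := by
    apply String.toList_injective
    rw [PySem.Str.toList_strip]
    simp [hstripc]
  have hne : (String.ofList t ≠ "") ↔ t ≠ [] := by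
    constructor
    · intro hs hnil; exact hs (by simp [hnil])
    · intro hnil hs
      exact hnil (by simpa using congrArg String.toList hs)
  simp only [pvAStepC, pvAStep, hstart, Bool.not_true, Bool.false_eq_true, if_false,
    hsplit, Option.getD_some]
  have hget : (PySem.List.pyGet? [String.ofList [':', 'u', 's', 'e', 'r'], String.ofList t]
      (1 : Int)) = some (String.ofList t) := by
    simp [PySem.List.pyGet?, PySem.List.pyIdx?]
  rw [hget]
  simp only [Option.getD_some, hstrip]
  by_cases hc : String.ofList t ≠ "" ∧ String.ofList t ∉ names
  · rw [if_pos hc, if_pos ⟨hne.mp hc.1, hc.2⟩]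
  · rw [if_neg hc, if_neg (fun hcc => hc ⟨hne.mpr hcc.1, hcc.2⟩)]

theorem pvDropWhile_head_space (s : List Char) (c : Char) (t : List Char)
    (h : s.dropWhile pvNotSpace = c :: t) : PySem.Chars.isspace c = true := by
  induction s with
  | nil => simp at h
  | cons a s ih =>
    rw [List.dropWhile_cons] at h
    by_cases ha : pvNotSpace a = true
    · rw [if_pos ha] at h; exact ih h
    · rw [if_neg ha] at h
      obtain ⟨rfl, -⟩ := List.cons.inj h
      simpa [pvNotSpace] using ha

theorem pvScan_shift (s : List Char) (names : List String) :
    pvScan (s.dropWhile pvNotSpace) false names = pvScan (s.dropWhile pvNotSpace) true names := by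
  cases h : s.dropWhile pvNotSpace with
  | nil => simp [pvScan]
  | cons c t =>
    have hc := pvDropWhile_head_space s c t h
    simp [pvScan, hc]

theorem pvMain : ∀ (n : Nat) (s : List Char), s.length ≤ n → ∀ names : List String,
    pvScan s true names = (pvWsplit s).foldl pvAStepC names := by
  intro n
  induction n with
  | zero =>
    intro s hs names
    have : s = [] := List.eq_nil_of_length_eq_zero (Nat.le_zero.mp hs)
    subst this
    simp [pvScan, pvWsplit]
  | succ n ih =>
    intro s hs names
    cases s with
    | nil => simp [pvScan, pvWsplit]
    | cons c rest =>
      by_cases hsp : PySem.Chars.isspace c = true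
      · rw [show pvScan (c :: rest) true names = pvScan rest true names by
            simp [pvScan, hsp]]
        rw [show pvWsplit (c :: rest) = pvWsplit rest by simp [pvWsplit, hsp]]
        exact ih rest (by simpa using Nat.lt_succ_iff.mp (by simpa using hs)) names
      · have hc : pvNotSpace c = true := by simp [pvNotSpace, hsp]
        have hwsplit : pvWsplit (c :: rest) =
            (c :: rest.takeWhile pvNotSpace) :: pvWsplit (rest.dropWhile pvNotSpace) := by
          simp [pvWsplit, hsp]
        by_cases hst : PySem.Chars.startswith (c :: rest) pvUserKey = true
        · -- the token starts with ":user="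
          have hpre : pvUserKey <+: (c :: rest) := by
            rw [PySem.Chars.startswith] at hst
            exact List.isPrefixOf_iff_prefix.mp hst
          obtain ⟨r, hr⟩ := hpre
          have hdrop6 : (c :: rest).drop 6 = r := by
            rw [← hr]; exact List.drop_left' (by rfl)
          have htake : (c :: rest).takeWhile pvNotSpace =
              pvUserKey ++ r.takeWhile pvNotSpace := by
            rw [← hr]; exact List.takeWhile_append_of_pos pvKey_notspace
          have hdropw : (c :: rest).dropWhile pvNotSpace = r.dropWhile pvNotSpace := by
            rw [← hr, List.dropWhile_append]
            have : (pvUserKey.dropWhile pvNotSpace) = [] := by decide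
            simp [this]
          have htake' : c :: rest.takeWhile pvNotSpace = pvUserKey ++ r.takeWhile pvNotSpace := by
            rw [← htake, List.takeWhile_cons, if_pos hc]
          have hdropw' : rest.dropWhile pvNotSpace = r.dropWhile pvNotSpace := by
            rw [← hdropw, List.dropWhile_cons, if_pos hc]
          have hscan : pvScan (c :: rest) true names =
              pvScan (r.dropWhile pvNotSpace) false
                (if r.takeWhile pvNotSpace ≠ [] ∧
                    String.ofList (r.takeWhile pvNotSpace) ∉ names
                 then names ++ [String.ofList (r.takeWhile pvNotSpace)] else names) := by
            rw [show pvScan (c :: rest) true names =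
                pvScan (((c :: rest).drop 6).dropWhile pvNotSpace) false
                  (if ((c :: rest).drop 6).takeWhile pvNotSpace ≠ [] ∧
                      String.ofList (((c :: rest).drop 6).takeWhile pvNotSpace) ∉ names
                   then names ++ [String.ofList (((c :: rest).drop 6).takeWhile pvNotSpace)]
                   else names) by simp [pvScan, hsp, hst]]
            rw [hdrop6]
          rw [hscan, pvScan_shift]
          have hrlen : (r.dropWhile pvNotSpace).length ≤ n := by
            have h1 := List.length_dropWhile_le pvNotSpace r
            have h2 := congrArg List.length hr
            simp [pvUserKey] at h2
            simp at hs
            omega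
          rw [ih _ hrlen]
          rw [hwsplit, List.foldl_cons, htake', pvAStepC_match, hdropw']
        · -- the token does not start with ":user="
          have hskip : pvAStepC names (c :: rest.takeWhile pvNotSpace) = names := by
            apply pvAStepC_skip
            have : (c :: rest).takeWhile pvNotSpace = c :: rest.takeWhile pvNotSpace := by
              rw [List.takeWhile_cons, if_pos hc]
            rw [PySem.Chars.startswith] at hst ⊢
            rw [← this, pvPrefix_takeWhile]
            exact Bool.not_eq_true _ ▸ (by simpa using hst)
          have hscan : pvScan (c :: rest) true names =
              pvScan ((c :: rest).dropWhile pvNotSpace) false names := by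
            simp [pvScan, hsp, hst]
          rw [hscan, List.dropWhile_cons, if_pos hc, pvScan_shift]
          have hrlen : (rest.dropWhile pvNotSpace).length ≤ n := by
            have h1 := List.length_dropWhile_le pvNotSpace rest
            simp at hs
            omega
          rw [ih _ hrlen, hwsplit, List.foldl_cons, hskip]

-- ===== VERDICT (by name: the statement is the Claim_ definition above) =====
theorem extract_user_filters_from_query_py_spec : Claim_equal_extract_user_filters_from_query_py := by
  intro query _
  unfold Spec_extract_user_filters_from_query_py
  unfold extract_user_filters_from_query_py extract_user_filters_from_query_py_alt
  by_cases h : PySem.Str.isIn ":uid=" query = true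
  · rw [if_pos h, if_pos h]
  · rw [if_neg h, if_neg h]
    rw [show PySem.Str.split₀ query = (pvWsplit query.toList).map String.ofList by
        rw [PySem.Str.split₀, pvSplit₀_eq]]
    rw [List.foldl_map]
    rw [pvMain query.toList.length query.toList le_rfl []]
    rfl
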